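-- pv_equiv track=rewrite | github.com/Kim-Myeongseop/coding_practice | 프로그래머스/3/84021. 퍼즐 조각 채우기/퍼즐 조각 채우기.py | check
-- ===== SOURCE A (Python) =====
-- def make_matrix(box_list):
--     y_list = []
--     x_list = []
--     for y, x in box_list:
--         y_list.append(y)
--         x_list.append(x)
--     min_y, min_x = min(y_list), min(x_list)
--     max_y, max_x = max(y_list), max(x_list)
--
--     matrix = [[0]*(max_x - min_x + 1) for _ in range(max_y - min_y + 1)]
--     for y, x in box_list:
--         matrix[y - min_y][x - min_x] = 1
--     return matrix
--
-- def rotate_matrix(matrix):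
--     m, n = len(matrix), len(matrix[0])   # m행 n열
--     rotated = [[0]*m for _ in range(n)]   # n행 m열
--     for i in range(n):
--         for j in range(m):
--             rotated[i][j] = matrix[j][n-1-i]
--     return rotated
--
-- def check(empty, block):
--     empty = make_matrix(empty)
--     block = make_matrix(block)
--     for i in range(4):
--         if i == 0:
--             if empty == block:
--                 return True
--         else:
--             empty = rotate_matrix(empty)
--             if empty == block:
--                 return True
--     return False
-- ===== SOURCE B (Python) =====
-- def check(empty, block):
--     def norm(cells):
--         s = {(y, x) for y, x in cells}
--         my = min(y for y, x in s)
--         mx = min(x for y, x in s)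
--         return {(y - my, x - mx) for y, x in s}
--
--     e = norm(empty)
--     b = norm(block)
--     for _ in range(4):
--         if e == b:
--             return True
--         e = norm({(-x, y) for y, x in e})
--     return False
-- ===== Notes on version B (the rewrite author's own statement) =====
-- stated objective: faster
-- what changed: B represents each shape as a set of (y,x) coordinates normalized by subtracting the minimum row and column, and rotates by the coordinate map (y,x) -> (-x,y) followed by re-normalization, instead of A's dense 0/1 matrices built cell by cell and rotated by copying every cell.
import Mathlib
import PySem

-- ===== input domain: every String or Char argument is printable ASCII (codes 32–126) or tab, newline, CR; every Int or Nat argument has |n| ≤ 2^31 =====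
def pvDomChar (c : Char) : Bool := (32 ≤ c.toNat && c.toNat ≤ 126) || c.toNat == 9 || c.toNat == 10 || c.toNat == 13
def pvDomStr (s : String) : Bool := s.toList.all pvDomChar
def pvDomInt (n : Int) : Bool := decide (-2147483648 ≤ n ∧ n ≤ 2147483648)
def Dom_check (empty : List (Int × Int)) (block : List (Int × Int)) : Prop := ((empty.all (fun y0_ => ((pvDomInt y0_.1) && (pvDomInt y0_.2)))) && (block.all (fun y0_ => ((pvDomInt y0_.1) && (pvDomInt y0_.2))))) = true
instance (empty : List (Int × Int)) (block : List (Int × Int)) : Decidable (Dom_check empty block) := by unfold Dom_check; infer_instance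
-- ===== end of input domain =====

-- B replaces A's dense 0/1 matrices and cell-copying rotation by normalized coordinate
-- sets rotated with a coordinate transform (objective: faster, measured by the timing
-- run; work per orientation is proportional to the occupied cells, not the bounding
-- box); equality of return values is proved on Pre_ (both programs raise ValueError
-- when either input list is empty).

-- ===== PORT A =====

-- make_matrix: none where Python raises ValueError (min() of an empty list)
def makeMatrix (box_list : List (Int × Int)) : Option (List (List Int)) :=
  let yx := box_list.foldl (fun (p : List Int × List Int) q => (p.1 ++ [q.1], p.2 ++ [q.2])) ([], [])
  match PySem.List.min? yx.1 (fun v => v), PySem.List.min? yx.2 (fun v => v),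
        PySem.List.max? yx.1 (fun v => v), PySem.List.max? yx.2 (fun v => v) with
  | some minY, some minX, some maxY, some maxX =>
    let matrix0 : List (List Int) :=
      (List.range (maxY - minY + 1).toNat).map (fun _ => List.replicate (maxX - minX + 1).toNat (0 : Int))
    some (box_list.foldl (fun m q =>
      m.modify (q.1 - minY).toNat (fun row => row.set (q.2 - minX).toNat 1)) matrix0)
  | _, _, _, _ => none

def rotateMatrix (matrix : List (List Int)) : List (List Int) :=
  let m := matrix.length
  let n := (matrix.headD []).length
  (List.range n).map (fun i => (List.range m).map (fun j =>
    ((matrix.getD j []).getD (n - 1 - i) 0)))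

def checkLoop (b : List (List Int)) : List (List Int) → List Nat → Bool
  | _, [] => false
  | e, i :: rest =>
    if i = 0 then
      if e = b then true else checkLoop b e rest
    else
      let e' := rotateMatrix e
      if e' = b then true else checkLoop b e' rest

def check (empty : List (Int × Int)) (block : List (Int × Int)) : Bool :=
  match makeMatrix empty, makeMatrix block with
  | some e, some b => checkLoop b e (List.range 4)
  | _, _ => false

-- ===== PORT B =====

-- norm: none where Python raises ValueError (min() of an empty set)
def normSet (cells : List (Int × Int)) : Option (PySem.Set (Int × Int)) :=
  let s := PySem.Set.ofList cells
  match PySem.List.min? (s.map (fun p => p.1)) (fun v => v),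
        PySem.List.min? (s.map (fun p => p.2)) (fun v => v) with
  | some my, some mx => some (PySem.Set.ofList (s.map (fun p => (p.1 - my, p.2 - mx))))
  | _, _ => none

def checkAltLoop (b : PySem.Set (Int × Int)) : PySem.Set (Int × Int) → Nat → Bool
  | _, 0 => false
  | e, k + 1 =>
    if PySem.Set.equal e b then true
    else
      match normSet (e.map (fun p => (-p.2, p.1))) with
      | some e' => checkAltLoop b e' k
      | none => false

def check_alt (empty : List (Int × Int)) (block : List (Int × Int)) : Bool :=
  match normSet empty, normSet block with
  | some e, some b => checkAltLoop b e 4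
  | _, _ => false

-- ===== PRECONDITION & SPEC =====
-- Pre_ excludes exactly the inputs with an empty list, where both A and B raise
-- ValueError (min() of an empty sequence).
def Pre_check (empty : List (Int × Int)) (block : List (Int × Int)) : Prop :=
  empty ≠ [] ∧ block ≠ []
instance (empty : List (Int × Int)) (block : List (Int × Int)) : Decidable (Pre_check empty block) := by
  unfold Pre_check; infer_instance

def pvWitness_check : (List (Int × Int)) × (List (Int × Int)) :=
  ([((0 : Int), (0 : Int))], [((1 : Int), (1 : Int))])

def Spec_check (empty : List (Int × Int)) (block : List (Int × Int)) (out : Bool) : Prop := out = check_alt empty block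
instance (empty : List (Int × Int)) (block : List (Int × Int)) (out : Bool) : Decidable (Spec_check empty block out) := by unfold Spec_check; infer_instance

-- ===== CLAIM (what is proved, stated in full; the proofs are below) =====
def Claim_equal_check : Prop := ∀ (empty : List (Int × Int)) (block : List (Int × Int)), Dom_check empty block → Pre_check empty block → Spec_check empty block (check empty block)

-- ===== LEMMAS AND PROOFS =====

def cellOf (S : List (Int × Int)) (i j : Nat) : Int :=
  if ((i : Int), (j : Int)) ∈ S then 1 else 0

def rowOf (S : List (Int × Int)) (w i : Nat) : List Int :=
  (List.range w).map (cellOf S i)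

def matOf (S : List (Int × Int)) (h w : Nat) : List (List Int) :=
  (List.range h).map (rowOf S w)

theorem length_matOf (S : List (Int × Int)) (h w : Nat) : (matOf S h w).length = h := by
  simp [matOf]

theorem length_rowOf (S : List (Int × Int)) (w i : Nat) : (rowOf S w i).length = w := by
  simp [rowOf]

theorem getElem_matOf (S : List (Int × Int)) (h w i : Nat) (hi : i < (matOf S h w).length) :
    (matOf S h w)[i] = rowOf S w i := by
  simp [matOf]

theorem getElem_rowOf (S : List (Int × Int)) (w i j : Nat) (hj : j < (rowOf S w i).length) :
    (rowOf S w i)[j] = cellOf S i j := by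
  simp [rowOf]

theorem modify_matOf (S : List (Int × Int)) (h w a b : Nat) (ha : a < h) (_hb : b < w) :
    (matOf S h w).modify a (fun row => row.set b 1) = matOf (S ++ [((a : Int), (b : Int))]) h w := by
  apply List.ext_getElem
  · simp [matOf]
  intro i hi hi'
  rw [List.getElem_modify, getElem_matOf]
  by_cases hia : a = i
  · subst hia
    rw [if_pos rfl, getElem_matOf _ _ _ _ (by rwa [length_matOf])]
    apply List.ext_getElem
    · simp [rowOf]
    intro j hj hj'
    rw [List.getElem_set, getElem_rowOf]
    rw [getElem_rowOf _ _ _ _ (by simpa [length_rowOf] using hj')] at *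
    by_cases hjb : b = j
    · subst hjb
      rw [if_pos rfl]
      simp [cellOf]
    · rw [if_neg hjb]
      unfold cellOf
      have hne : ¬(((a : Int), (j : Int)) = ((a : Int), (b : Int))) := by
        simp only [Prod.mk.injEq]
        omega
      simp only [List.mem_append, List.mem_singleton, hne, or_false]
  · rw [if_neg hia, getElem_matOf _ _ _ _ (by simpa [length_matOf] using hi')]
    unfold rowOf
    apply List.map_congr_left
    intro j hj
    unfold cellOf
    have hne : ¬(((i : Int), (j : Int)) = ((a : Int), (b : Int))) := by
      simp only [Prod.mk.injEq]
      omega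
    simp only [List.mem_append, List.mem_singleton, hne, or_false]

theorem foldl_fill (mY mX : Int) (h w : Nat) (L : List (Int × Int)) (S : List (Int × Int))
    (hbnd : ∀ p ∈ L, 0 ≤ p.1 - mY ∧ (p.1 - mY).toNat < h ∧ 0 ≤ p.2 - mX ∧ (p.2 - mX).toNat < w) :
    L.foldl (fun m q => m.modify (q.1 - mY).toNat (fun row => row.set (q.2 - mX).toNat 1)) (matOf S h w)
      = matOf (S ++ L.map (fun p => (p.1 - mY, p.2 - mX))) h w := by
  induction L generalizing S with
  | nil => simp
  | cons p t ih =>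
    obtain ⟨h1, h2, h3, h4⟩ := hbnd p (by simp)
    simp only [List.foldl_cons]
    rw [modify_matOf S h w _ _ h2 h4]
    rw [ih (S ++ [(((p.1 - mY).toNat : Int), ((p.2 - mX).toNat : Int))]) (fun q hq => hbnd q (by simp [hq]))]
    rw [Int.toNat_of_nonneg h1, Int.toNat_of_nonneg h3]
    simp

def Tight (S : List (Int × Int)) (h w : Nat) : Prop :=
  (∀ c ∈ S, 0 ≤ c.1 ∧ c.1 < (h : Int) ∧ 0 ≤ c.2 ∧ c.2 < (w : Int)) ∧
  (∃ c ∈ S, c.1 = 0) ∧ (∃ c ∈ S, c.1 = (h : Int) - 1) ∧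
  (∃ c ∈ S, c.2 = 0) ∧ (∃ c ∈ S, c.2 = (w : Int) - 1)

theorem foldl_pair_append (L : List (Int × Int)) (a1 a2 : List Int) :
    L.foldl (fun (p : List Int × List Int) q => (p.1 ++ [q.1], p.2 ++ [q.2])) (a1, a2)
      = (a1 ++ L.map Prod.fst, a2 ++ L.map Prod.snd) := by
  induction L generalizing a1 a2 with
  | nil => simp
  | cons x t ih => simp [ih]

theorem makeMatrix_spec (L : List (Int × Int)) (hL : L ≠ []) :
    ∃ my mx My Mx,
      PySem.List.min? (L.map Prod.fst) (fun v => v) = some my ∧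
      PySem.List.min? (L.map Prod.snd) (fun v => v) = some mx ∧
      makeMatrix L = some (matOf (L.map (fun p => (p.1 - my, p.2 - mx))) (My - my + 1).toNat (Mx - mx + 1).toNat) ∧
      Tight (L.map (fun p => (p.1 - my, p.2 - mx))) (My - my + 1).toNat (Mx - mx + 1).toNat := by
  have hfst : L.map Prod.fst ≠ [] := by simpa using hL
  have hsnd : L.map Prod.snd ≠ [] := by simpa using hL
  obtain ⟨my, hmy⟩ : ∃ m, PySem.List.min? (L.map Prod.fst) (fun v => v) = some m := by
    cases h : PySem.List.min? (L.map Prod.fst) (fun v => v) with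
    | none => exact absurd ((PySem.List.min?_eq_none_iff _ _).mp h) hfst
    | some m => exact ⟨m, rfl⟩
  obtain ⟨mx, hmx⟩ : ∃ m, PySem.List.min? (L.map Prod.snd) (fun v => v) = some m := by
    cases h : PySem.List.min? (L.map Prod.snd) (fun v => v) with
    | none => exact absurd ((PySem.List.min?_eq_none_iff _ _).mp h) hsnd
    | some m => exact ⟨m, rfl⟩
  obtain ⟨My, hMy⟩ : ∃ m, PySem.List.max? (L.map Prod.fst) (fun v => v) = some m := by
    cases h : PySem.List.max? (L.map Prod.fst) (fun v => v) with
    | none => exact absurd ((PySem.List.max?_eq_none_iff _ _).mp h) hfst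
    | some m => exact ⟨m, rfl⟩
  obtain ⟨Mx, hMx⟩ : ∃ m, PySem.List.max? (L.map Prod.snd) (fun v => v) = some m := by
    cases h : PySem.List.max? (L.map Prod.snd) (fun v => v) with
    | none => exact absurd ((PySem.List.max?_eq_none_iff _ _).mp h) hsnd
    | some m => exact ⟨m, rfl⟩
  refine ⟨my, mx, My, Mx, hmy, hmx, ?_, ?_⟩
  · -- makeMatrix L computes matOf
    have hmyle : ∀ p ∈ L, my ≤ p.1 := fun p hp =>
      PySem.List.min?_isMin hmy p.1 (List.mem_map_of_mem hp)
    have hmxle : ∀ p ∈ L, mx ≤ p.2 := fun p hp =>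
      PySem.List.min?_isMin hmx p.2 (List.mem_map_of_mem hp)
    have hMyge : ∀ p ∈ L, p.1 ≤ My := fun p hp =>
      PySem.List.max?_isMax hMy p.1 (List.mem_map_of_mem hp)
    have hMxge : ∀ p ∈ L, p.2 ≤ Mx := fun p hp =>
      PySem.List.max?_isMax hMx p.2 (List.mem_map_of_mem hp)
    unfold makeMatrix
    rw [foldl_pair_append]
    simp only [List.nil_append]
    rw [hmy, hmx, hMy, hMx]
    dsimp only
    have hz : (List.range (My - my + 1).toNat).map (fun _ => List.replicate (Mx - mx + 1).toNat (0:Int))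
        = matOf [] (My - my + 1).toNat (Mx - mx + 1).toNat := by
      unfold matOf rowOf cellOf
      simp [List.map_const']
    rw [hz, foldl_fill]
    · simp
    · intro p hp
      have h1 := hmyle p hp
      have h2 := hMyge p hp
      have h3 := hmxle p hp
      have h4 := hMxge p hp
      refine ⟨by omega, by omega, by omega, by omega⟩
  · -- Tight
    have hmymem := PySem.List.min?_mem hmy
    have hmxmem := PySem.List.min?_mem hmx
    have hMymem := PySem.List.max?_mem hMy
    have hMxmem := PySem.List.max?_mem hMx
    simp only [List.mem_map] at hmymem hmxmem hMymem hMxmem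
    obtain ⟨p1, hp1, hp1e⟩ := hmymem
    obtain ⟨p2, hp2, hp2e⟩ := hmxmem
    obtain ⟨p3, hp3, hp3e⟩ := hMymem
    obtain ⟨p4, hp4, hp4e⟩ := hMxmem
    have hmyle : ∀ p ∈ L, my ≤ p.1 := fun p hp =>
      PySem.List.min?_isMin hmy p.1 (List.mem_map_of_mem hp)
    have hmxle : ∀ p ∈ L, mx ≤ p.2 := fun p hp =>
      PySem.List.min?_isMin hmx p.2 (List.mem_map_of_mem hp)
    have hMyge : ∀ p ∈ L, p.1 ≤ My := fun p hp =>
      PySem.List.max?_isMax hMy p.1 (List.mem_map_of_mem hp)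
    have hMxge : ∀ p ∈ L, p.2 ≤ Mx := fun p hp =>
      PySem.List.max?_isMax hMx p.2 (List.mem_map_of_mem hp)
    have hMy1 : my ≤ My := le_trans (hmyle p3 hp3) (by omega)
    have hMx1 : mx ≤ Mx := le_trans (hmxle p4 hp4) (by omega)
    refine ⟨?_, ?_, ?_, ?_, ?_⟩
    · rintro c hc
      simp only [List.mem_map] at hc
      obtain ⟨p, hp, rfl⟩ := hc
      have := hmyle p hp; have := hMyge p hp; have := hmxle p hp; have := hMxge p hp
      constructor
      · omega
      refine ⟨?_, by omega, ?_⟩ <;> omega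
    · exact ⟨_, List.mem_map_of_mem hp1, by simp; omega⟩
    · exact ⟨_, List.mem_map_of_mem hp3, by simp; omega⟩
    · exact ⟨_, List.mem_map_of_mem hp2, by simp; omega⟩
    · exact ⟨_, List.mem_map_of_mem hp4, by simp; omega⟩

theorem cellOf_eq_one (S : List (Int × Int)) (i j : Nat) :
    cellOf S i j = 1 ↔ ((i : Int), (j : Int)) ∈ S := by
  unfold cellOf
  split <;> simp_all

theorem Tight_pos {S : List (Int × Int)} {h w : Nat} (t : Tight S h w) : 0 < h ∧ 0 < w := by
  obtain ⟨hb, ⟨c, hc, _⟩, -, -, -⟩ := t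
  have := hb c hc
  omega

theorem matOf_entry_eq {S1 S2 : List (Int × Int)} {h w : Nat}
    (hEq : matOf S1 h w = matOf S2 h w) (i j : Nat) (hi : i < h) (hj : j < w) :
    cellOf S1 i j = cellOf S2 i j := by
  have h1 : (matOf S1 h w)[i]'(by rw [length_matOf]; exact hi)
      = (matOf S2 h w)[i]'(by rw [length_matOf]; exact hi) := by
    simp_rw [hEq]
  rw [getElem_matOf, getElem_matOf] at h1
  have h2 : (rowOf S1 w i)[j]'(by rw [length_rowOf]; exact hj)
      = (rowOf S2 w i)[j]'(by rw [length_rowOf]; exact hj) := by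
    simp_rw [h1]
  rwa [getElem_rowOf, getElem_rowOf] at h2

theorem matOf_eq_iff {S1 S2 : List (Int × Int)} {h1 w1 h2 w2 : Nat}
    (t1 : Tight S1 h1 w1) (t2 : Tight S2 h2 w2) :
    (matOf S1 h1 w1 = matOf S2 h2 w2) ↔ ∀ c, c ∈ S1 ↔ c ∈ S2 := by
  constructor
  · intro hEq
    have hh : h1 = h2 := by
      have := congrArg List.length hEq
      rwa [length_matOf, length_matOf] at this
    have hw : w1 = w2 := by
      obtain ⟨hp1, hp2⟩ := Tight_pos t1
      have hr : (matOf S1 h1 w1)[0]'(by rw [length_matOf]; exact hp1)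
          = (matOf S2 h2 w2)[0]'(by rw [length_matOf]; omega) := by
        simp_rw [hEq]
      rw [getElem_matOf, getElem_matOf] at hr
      have := congrArg List.length hr
      rwa [length_rowOf, length_rowOf] at this
    subst hh; subst hw
    intro c
    constructor
    · intro hc
      obtain ⟨hb, -, -, -, -⟩ := t1
      obtain ⟨hc1, hc2, hc3, hc4⟩ := hb c hc
      have hcell := matOf_entry_eq hEq c.1.toNat c.2.toNat (by omega) (by omega)
      have hmem1 : ((c.1.toNat : Int), (c.2.toNat : Int)) ∈ S1 := by
        rwa [Int.toNat_of_nonneg hc1, Int.toNat_of_nonneg hc3, Prod.mk.eta]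
      rw [(cellOf_eq_one S1 _ _).mpr hmem1] at hcell
      have := (cellOf_eq_one S2 _ _).mp hcell.symm
      rwa [Int.toNat_of_nonneg hc1, Int.toNat_of_nonneg hc3, Prod.mk.eta] at this
    · intro hc
      obtain ⟨hb, -, -, -, -⟩ := t2
      obtain ⟨hc1, hc2, hc3, hc4⟩ := hb c hc
      have hcell := matOf_entry_eq hEq c.1.toNat c.2.toNat (by omega) (by omega)
      have hmem2 : ((c.1.toNat : Int), (c.2.toNat : Int)) ∈ S2 := by
        rwa [Int.toNat_of_nonneg hc1, Int.toNat_of_nonneg hc3, Prod.mk.eta]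
      rw [(cellOf_eq_one S2 _ _).mpr hmem2] at hcell
      have := (cellOf_eq_one S1 _ _).mp hcell
      rwa [Int.toNat_of_nonneg hc1, Int.toNat_of_nonneg hc3, Prod.mk.eta] at this
  · intro hm
    obtain ⟨p1, p2⟩ := Tight_pos t1
    obtain ⟨q1, q2⟩ := Tight_pos t2
    have hh : h1 = h2 := by
      obtain ⟨hb1, -, ⟨c, hc, hce⟩, -, -⟩ := t1
      obtain ⟨hb2, -, ⟨c', hc', hce'⟩, -, -⟩ := t2
      have l1 := (hb2 c ((hm c).mp hc)).2.1
      have l2 := (hb1 c' ((hm c').mpr hc')).2.1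
      omega
    have hw : w1 = w2 := by
      obtain ⟨hb1, -, -, -, ⟨c, hc, hce⟩⟩ := t1
      obtain ⟨hb2, -, -, -, ⟨c', hc', hce'⟩⟩ := t2
      have l1 := (hb2 c ((hm c).mp hc)).2.2.2
      have l2 := (hb1 c' ((hm c').mpr hc')).2.2.2
      omega
    subst hh; subst hw
    unfold matOf
    apply List.map_congr_left
    intro i _
    unfold rowOf
    apply List.map_congr_left
    intro j _
    unfold cellOf
    rw [if_congr (hm _) rfl rfl]

theorem rotate_matOf {S : List (Int × Int)} {h w : Nat} (t : Tight S h w) :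
    rotateMatrix (matOf S h w) = matOf (S.map (fun c => ((w : Int) - 1 - c.2, c.1))) w h := by
  obtain ⟨hp1, hp2⟩ := Tight_pos t
  obtain ⟨hb, -, -, -, -⟩ := t
  unfold rotateMatrix
  have hm : (matOf S h w).length = h := length_matOf S h w
  have hhead : (matOf S h w).headD [] = rowOf S w 0 := by
    unfold matOf
    obtain ⟨k, rfl⟩ : ∃ k, h = k + 1 := ⟨h - 1, by omega⟩
    rw [List.range_succ_eq_map]
    simp
  rw [hm, hhead, length_rowOf]
  apply List.ext_getElem
  · simp [matOf]
  intro i hi hi'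
  rw [List.length_map, List.length_range] at hi
  rw [List.getElem_map, List.getElem_range, getElem_matOf]
  apply List.ext_getElem
  · simp [rowOf]
  intro j hj hj'
  rw [List.length_map, List.length_range] at hj
  rw [List.getElem_map, List.getElem_range, getElem_rowOf]
  have hg1 : (matOf S h w).getD j [] = rowOf S w j := by
    rw [List.getD_eq_getElem _ _ (by rw [length_matOf]; exact hj), getElem_matOf]
  rw [hg1, List.getD_eq_getElem _ _ (by rw [length_rowOf]; omega), getElem_rowOf]
  -- cellOf S j (w-1-i) = cellOf S' i j
  unfold cellOf
  have hcast : ((w - 1 - i : Nat) : Int) = (w : Int) - 1 - (i : Int) := by omega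
  congr 1
  simp only [List.mem_map, eq_iff_iff]
  constructor
  · intro hmem
    refine ⟨((j : Int), (w : Int) - 1 - (i : Int)), ?_, ?_⟩
    · rwa [hcast] at hmem
    · have hred : (w : Int) - 1 - ((w : Int) - 1 - (i : Int)) = (i : Int) := by omega
      simp [hred]
  · rintro ⟨c, hc, hce⟩
    have hcb := hb c hc
    simp only [Prod.mk.injEq] at hce
    have h1 : c.1 = (j : Int) := hce.2
    have h2 : c.2 = (w : Int) - 1 - (i : Int) := by omega
    rw [hcast]
    rw [← h1, ← h2, Prod.mk.eta]
    exact hc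

theorem Tight_rot {S : List (Int × Int)} {h w : Nat} (t : Tight S h w) :
    Tight (S.map (fun c => ((w : Int) - 1 - c.2, c.1))) w h := by
  obtain ⟨hb, ⟨c1, hc1, he1⟩, ⟨c2, hc2, he2⟩, ⟨c3, hc3, he3⟩, ⟨c4, hc4, he4⟩⟩ := t
  refine ⟨?_, ?_, ?_, ?_, ?_⟩
  · rintro c hc
    simp only [List.mem_map] at hc
    obtain ⟨p, hp, rfl⟩ := hc
    have := hb p hp
    refine ⟨by omega, by omega, by omega, by omega⟩
  · exact ⟨_, List.mem_map_of_mem hc4, by simp; omega⟩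
  · exact ⟨_, List.mem_map_of_mem hc3, by simp; omega⟩
  · exact ⟨_, List.mem_map_of_mem hc1, by simp [he1]⟩
  · exact ⟨_, List.mem_map_of_mem hc2, by simp; omega⟩

theorem min?_eq_of_mem_of_le {xs : List Int} {m : Int} (h1 : m ∈ xs) (h2 : ∀ a ∈ xs, m ≤ a) :
    PySem.List.min? xs (fun v => v) = some m := by
  cases h : PySem.List.min? xs (fun v => v) with
  | none => rw [PySem.List.min?_eq_none_iff] at h; subst h; simp at h1
  | some m' =>
    have hle := PySem.List.min?_isMin h m h1
    have hge := h2 m' (PySem.List.min?_mem h)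
    simp only [Option.some.injEq]
    omega

theorem normSet_spec (X : List (Int × Int)) (my mx : Int)
    (hmy : PySem.List.min? (X.map Prod.fst) (fun v => v) = some my)
    (hmx : PySem.List.min? (X.map Prod.snd) (fun v => v) = some mx) :
    ∃ s, normSet X = some s ∧ ∀ c, c ∈ s ↔ c ∈ X.map (fun p => (p.1 - my, p.2 - mx)) := by
  have hmy' : PySem.List.min? ((PySem.Set.ofList X).map (fun p => p.1)) (fun v => v) = some my := by
    apply min?_eq_of_mem_of_le
    · have := PySem.List.min?_mem hmy
      simp only [List.mem_map] at this ⊢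
      obtain ⟨p, hp, hpe⟩ := this
      exact ⟨p, (PySem.Set.mem_ofList X p).mpr hp, hpe⟩
    · intro a ha
      simp only [List.mem_map] at ha
      obtain ⟨p, hp, rfl⟩ := ha
      exact PySem.List.min?_isMin hmy p.1 (List.mem_map_of_mem ((PySem.Set.mem_ofList X p).mp hp))
  have hmx' : PySem.List.min? ((PySem.Set.ofList X).map (fun p => p.2)) (fun v => v) = some mx := by
    apply min?_eq_of_mem_of_le
    · have := PySem.List.min?_mem hmx
      simp only [List.mem_map] at this ⊢
      obtain ⟨p, hp, hpe⟩ := this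
      exact ⟨p, (PySem.Set.mem_ofList X p).mpr hp, hpe⟩
    · intro a ha
      simp only [List.mem_map] at ha
      obtain ⟨p, hp, rfl⟩ := ha
      exact PySem.List.min?_isMin hmx p.2 (List.mem_map_of_mem ((PySem.Set.mem_ofList X p).mp hp))
  refine ⟨PySem.Set.ofList ((PySem.Set.ofList X).map (fun p => (p.1 - my, p.2 - mx))), ?_, ?_⟩
  · simp only [normSet]
    rw [hmy', hmx']
  · intro c
    rw [PySem.Set.mem_ofList]
    simp only [List.mem_map]
    constructor
    · rintro ⟨p, hp, rfl⟩
      exact ⟨p, (PySem.Set.mem_ofList X p).mp hp, rfl⟩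
    · rintro ⟨p, hp, rfl⟩
      exact ⟨p, (PySem.Set.mem_ofList X p).mpr hp, rfl⟩

theorem step_spec {s S : List (Int × Int)} {h w : Nat}
    (hmem : ∀ c, c ∈ s ↔ c ∈ S) (t : Tight S h w) :
    ∃ s', normSet (s.map (fun p => (-p.2, p.1))) = some s' ∧
      ∀ c, c ∈ s' ↔ c ∈ S.map (fun c => ((w : Int) - 1 - c.2, c.1)) := by
  obtain ⟨hb, ⟨c1, hc1, he1⟩, ⟨c2, hc2, he2⟩, ⟨c3, hc3, he3⟩, ⟨c4, hc4, he4⟩⟩ := t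
  have hmyX : PySem.List.min? ((s.map (fun p => (-p.2, p.1))).map Prod.fst) (fun v => v)
      = some (-((w : Int) - 1)) := by
    apply min?_eq_of_mem_of_le
    · simp only [List.map_map, List.mem_map, Function.comp]
      exact ⟨c4, (hmem c4).mpr hc4, by simp [he4]⟩
    · intro a ha
      simp only [List.map_map, List.mem_map, Function.comp] at ha
      obtain ⟨p, hp, rfl⟩ := ha
      have := (hb p ((hmem p).mp hp)).2.2.2
      omega
  have hmxX : PySem.List.min? ((s.map (fun p => (-p.2, p.1))).map Prod.snd) (fun v => v)
      = some 0 := by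
    apply min?_eq_of_mem_of_le
    · simp only [List.map_map, List.mem_map, Function.comp]
      exact ⟨c1, (hmem c1).mpr hc1, by simp [he1]⟩
    · intro a ha
      simp only [List.map_map, List.mem_map, Function.comp] at ha
      obtain ⟨p, hp, rfl⟩ := ha
      exact (hb p ((hmem p).mp hp)).1
  obtain ⟨s', hs', hmem'⟩ := normSet_spec _ _ _ hmyX hmxX
  refine ⟨s', hs', ?_⟩
  intro c
  rw [hmem' c]
  simp only [List.map_map, List.mem_map, Function.comp]
  constructor
  · rintro ⟨p, hp, rfl⟩
    refine ⟨p, (hmem p).mp hp, ?_⟩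
    simp only [Prod.mk.injEq]
    constructor <;> omega
  · rintro ⟨p, hp, rfl⟩
    refine ⟨p, (hmem p).mpr hp, ?_⟩
    simp only [Prod.mk.injEq]
    constructor <;> omega

theorem cond_iff {Sk T sk sB : List (Int × Int)} {hk wk hb wb : Nat}
    (tk : Tight Sk hk wk) (tb : Tight T hb wb)
    (hmemk : ∀ c, c ∈ sk ↔ c ∈ Sk) (hmemb : ∀ c, c ∈ sB ↔ c ∈ T) :
    (matOf Sk hk wk = matOf T hb wb) ↔ (PySem.Set.equal sk sB = true) := by
  rw [matOf_eq_iff tk tb, PySem.Set.equal_iff]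
  apply forall_congr'
  intro c
  rw [hmemk c, hmemb c]

theorem check_eq_alt (E B : List (Int × Int)) (hE : E ≠ []) (hB : B ≠ []) :
    check E B = check_alt E B := by
  obtain ⟨my, mx, My, Mx, hmy, hmx, hmkE, htE⟩ := makeMatrix_spec E hE
  obtain ⟨ny, nx, Ny, Nx, hny, hnx, hmkB, htB⟩ := makeMatrix_spec B hB
  obtain ⟨sE, hsE, hmemE⟩ := normSet_spec E my mx hmy hmx
  obtain ⟨sB, hsB, hmemB⟩ := normSet_spec B ny nx hny hnx
  -- abbreviations
  set h0 := (My - my + 1).toNat with hh0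
  set w0 := (Mx - mx + 1).toNat with hw0
  set hb := (Ny - ny + 1).toNat with hhb
  set wb := (Nx - nx + 1).toNat with hwb
  set S0 := E.map (fun p => (p.1 - my, p.2 - mx)) with hS0
  set T := B.map (fun p => (p.1 - ny, p.2 - nx)) with hT
  set S1 := S0.map (fun c => ((w0 : Int) - 1 - c.2, c.1)) with hS1
  set S2 := S1.map (fun c => ((h0 : Int) - 1 - c.2, c.1)) with hS2
  set S3 := S2.map (fun c => ((w0 : Int) - 1 - c.2, c.1)) with hS3
  have t0 : Tight S0 h0 w0 := htE
  have t1 : Tight S1 w0 h0 := Tight_rot t0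
  have t2 : Tight S2 h0 w0 := Tight_rot t1
  have t3 : Tight S3 w0 h0 := Tight_rot t2
  obtain ⟨s1, hs1, hmem1⟩ := step_spec hmemE t0
  obtain ⟨s2, hs2, hmem2⟩ := step_spec hmem1 t1
  obtain ⟨s3, hs3, hmem3⟩ := step_spec hmem2 t2
  obtain ⟨s4, hs4, -⟩ := step_spec hmem3 t3
  have hA : check E B =
      (if matOf S0 h0 w0 = matOf T hb wb then true
       else if matOf S1 w0 h0 = matOf T hb wb then true
       else if matOf S2 h0 w0 = matOf T hb wb then true
       else if matOf S3 w0 h0 = matOf T hb wb then true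
       else false) := by
    unfold check
    rw [hmkE, hmkB]
    have hr4 : List.range 4 = [0, 1, 2, 3] := by decide
    rw [hr4]
    simp only [checkLoop]
    rw [rotate_matOf t0, rotate_matOf t1, rotate_matOf t2]
    rw [← hS1, ← hS2, ← hS3]
    norm_num
  have hAlt : check_alt E B =
      (if PySem.Set.equal sE sB then true
       else if PySem.Set.equal s1 sB then true
       else if PySem.Set.equal s2 sB then true
       else if PySem.Set.equal s3 sB then true
       else false) := by
    unfold check_alt
    rw [hsE, hsB]
    simp only [checkAltLoop, hs1, hs2, hs3, hs4]
  rw [hA, hAlt]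
  have hc0 := cond_iff t0 htB hmemE hmemB
  have hc1 := cond_iff t1 htB hmem1 hmemB
  have hc2 := cond_iff t2 htB hmem2 hmemB
  have hc3 := cond_iff t3 htB hmem3 hmemB
  simp only [hc0, hc1, hc2, hc3]

-- ===== VERDICT (by name: the statement is the Claim_ definition above) =====
theorem check_spec : Claim_equal_check := by
  intro E B _ hpre
  unfold Pre_check at hpre
  unfold Spec_check
  exact check_eq_alt E B hpre.1 hpre.2
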